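-- pv_equiv track=rewrite | github.com/puzhizhi/findiff | findiff/core/reprs.py | to_long_index
-- ===== SOURCE A (Python) =====
-- def to_long_index(idx, shape):
--     ndims = len(shape)
--     long_idx = 0
--     siz = 1
--     for axis in range(ndims):
--         long_idx += idx[ndims-1-axis] * siz
--         siz *= shape[ndims-1-axis]
--     return long_idx
-- ===== SOURCE B (Python) =====
-- def to_long_index(idx, shape):
--     long_idx = 0
--     for axis in range(len(shape)):
--         long_idx = long_idx * shape[axis] + idx[axis]
--     return long_idx
-- ===== Notes on version B (the rewrite author's own statement) =====
-- stated objective: simpler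
-- what changed: Replaces the back-to-front loop maintaining a separate running stride (siz) with forward Horner's method keeping a single accumulator (long_idx = long_idx*shape[axis] + idx[axis]).
import Mathlib
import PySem

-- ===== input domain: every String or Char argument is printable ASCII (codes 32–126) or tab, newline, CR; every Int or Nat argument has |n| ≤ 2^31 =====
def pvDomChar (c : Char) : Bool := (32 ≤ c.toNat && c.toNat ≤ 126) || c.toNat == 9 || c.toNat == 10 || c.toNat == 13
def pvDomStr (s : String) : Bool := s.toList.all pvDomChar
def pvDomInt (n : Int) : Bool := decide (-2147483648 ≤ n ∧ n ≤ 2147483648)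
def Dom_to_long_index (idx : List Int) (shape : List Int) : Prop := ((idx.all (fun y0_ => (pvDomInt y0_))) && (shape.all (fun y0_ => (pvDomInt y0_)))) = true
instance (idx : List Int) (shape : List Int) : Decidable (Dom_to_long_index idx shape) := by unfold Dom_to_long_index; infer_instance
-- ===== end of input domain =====

-- B replaces A's back-to-front loop with a running stride by forward Horner's method with a single accumulator (simpler).

-- ===== PORT A =====
-- pyGetD is exact on Pre_ (all accessed indices in range); where the Python raises IndexError, Pre_ excludes the input.
def to_long_index (idx : List Int) (shape : List Int) : Int :=
  let ndims : Int := shape.length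
  ((PySem.List.pyRange 0 ndims 1).foldl
    (fun (st : Int × Int) axis =>
      (st.1 + PySem.List.pyGetD idx (ndims - 1 - axis) 0 * st.2,
       st.2 * PySem.List.pyGetD shape (ndims - 1 - axis) 0))
    (0, 1)).1

-- ===== PORT B =====
def to_long_index_alt (idx : List Int) (shape : List Int) : Int :=
  (PySem.List.pyRange 0 (shape.length : Int) 1).foldl
    (fun long_idx axis =>
      long_idx * PySem.List.pyGetD shape axis 0 + PySem.List.pyGetD idx axis 0)
    0

-- ===== PRECONDITION & SPEC =====
-- Pre_ excludes exactly the inputs where A raises IndexError: len(idx) < len(shape) (B raises there too).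
def Pre_to_long_index (idx : List Int) (shape : List Int) : Prop := shape.length ≤ idx.length
instance (idx : List Int) (shape : List Int) : Decidable (Pre_to_long_index idx shape) := by unfold Pre_to_long_index; infer_instance
def pvWitness_to_long_index : List Int × List Int := ([1, 2, 0], [3, 4, 5])
def Spec_to_long_index (idx : List Int) (shape : List Int) (out : Int) : Prop := out = to_long_index_alt idx shape
instance (idx : List Int) (shape : List Int) (out : Int) : Decidable (Spec_to_long_index idx shape out) := by unfold Spec_to_long_index; infer_instance

-- ===== CLAIM (what is proved, stated in full; the proofs are below) =====
def Claim_equal_to_long_index : Prop := ∀ (idx : List Int) (shape : List Int), Dom_to_long_index idx shape → Pre_to_long_index idx shape → Spec_to_long_index idx shape (to_long_index idx shape)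

-- ===== LEMMAS AND PROOFS =====

-- A's pair-fold over a reversed list, in terms of the forward Horner fold.
theorem revFold_horner (L : List (Int × Int)) :
    ∀ (li siz : Int),
      (L.reverse.foldl (fun (st : Int × Int) p => (st.1 + p.1 * st.2, st.2 * p.2)) (li, siz)).1
        = li + (L.foldl (fun a p => a * p.2 + p.1) 0) * siz := by
  induction L using List.reverseRecOn with
  | nil => intro li siz; simp
  | append_singleton L' p ih =>
      intro li siz
      have hh : ∀ (a : Int), (L' ++ [p]).foldl (fun a p => a * p.2 + p.1) a
          = (L'.foldl (fun a p => a * p.2 + p.1) a) * p.2 + p.1 := by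
        intro a; simp [List.foldl_append]
      simp only [List.reverse_append, List.reverse_singleton, List.singleton_append,
        List.foldl_cons, ih, hh]
      ring

theorem range_map_sub (n : Nat) :
    (List.range n).map (fun k => n - 1 - k) = (List.range n).reverse := by
  apply List.ext_getElem
  · simp
  · intro i h1 h2
    simp at h1 ⊢

theorem horner_main (n : Nat) (f g : Int → Int) :
    ((PySem.List.pyRange 0 (n : Int) 1).foldl
        (fun (st : Int × Int) axis =>
          (st.1 + f ((n : Int) - 1 - axis) * st.2, st.2 * g ((n : Int) - 1 - axis)))
        (0, 1)).1
      = (PySem.List.pyRange 0 (n : Int) 1).foldl (fun a axis => a * g axis + f axis) 0 := by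
  have hrange : PySem.List.pyRange 0 (n : Int) 1 = (List.range n).map (fun k : Nat => (k : Int)) := by
    rw [PySem.List.pyRange_one]
    apply List.ext_getElem
    · simp
    · intro i h1 h2
      simp at h1 ⊢
  rw [hrange, List.foldl_map, List.foldl_map]
  set F : Nat → Int × Int := fun k => (f (k : Int), g (k : Int)) with hF
  have hA : (List.range n).foldl
      (fun (st : Int × Int) (axis : Nat) =>
        (st.1 + f ((n : Int) - 1 - (axis : Int)) * st.2, st.2 * g ((n : Int) - 1 - (axis : Int))))
      (0, 1)
      = (((List.range n).map F).reverse).foldl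
          (fun (st : Int × Int) p => (st.1 + p.1 * st.2, st.2 * p.2)) (0, 1) := by
    rw [← List.map_reverse, ← range_map_sub, List.map_map, List.foldl_map]
    apply PySem.List.foldl_congr_mem
    intro acc x hx
    have hxn : x < n := List.mem_range.mp hx
    have hcast : (n : Int) - 1 - (x : Int) = ((n - 1 - x : Nat) : Int) := by omega
    simp [hF, hcast]
  have hB : (List.range n).foldl
      (fun (a : Int) (axis : Nat) => a * g (axis : Int) + f (axis : Int)) 0
      = ((List.range n).map F).foldl (fun a p => a * p.2 + p.1) 0 := by
    rw [List.foldl_map]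
  rw [hA, hB, revFold_horner]
  ring

-- ===== VERDICT (by name: the statement is the Claim_ definition above) =====
theorem to_long_index_spec : Claim_equal_to_long_index := by
  intro idx shape _ _
  exact horner_main shape.length (fun i => PySem.List.pyGetD idx i 0)
    (fun i => PySem.List.pyGetD shape i 0)
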